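-- pv_equiv track=rewrite | github.com/d2xi/codility_ | L12.2/CommonPrimeDivisors.py | haveAllPrimeDivisorCommon
-- ===== SOURCE A (Python) =====
-- def haveAllPrimeDivisorCommon(a, b):
--     """
--     The funciton returns 1 if given pair of numbers (a,b) have the same set of prime factors.
--
--     Args:
--         a (int): Integer
--         b (int): Integer
--
--     Returns:
--         int: 1, if a and b have same set of prime factors, 0 otherwise
--     """
--     g = gcd(a,b)
--     if(a==1 and b==1):
--         return 1
--     elif(g == 1):
--         return 0
--     else:
--         k = a//g
--     if(k==1):
--         return 1
--     else:
--         return haveAllPrimeDivisorCommon(k,b)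
--
-- def gcd(a,b):
--     """
--     The function calculates the greatest common devisor of the numbers a and b.
--
--     Args:
--         a (int): An integer
--         b (int): An integer
--
--     Returns:
--         int: GCD(a,b)
--     """
--     r = a%b
--     if (r==0):
--         return b
--     return gcd(b, r)
-- ===== SOURCE B (Python) =====
-- def haveAllPrimeDivisorCommon(a, b):
--     """Iterative re-implementation: same asymmetric reduction (only a is divided
--     by the gcd), with the recursion unrolled into a while loop and the custom
--     modulo-first Euclid gcd written as an iterative loop."""
--     g = gcd(a, b)
--     if a == 1 and b == 1:
--         return 1
--     while g != 1:
--         a = a // g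
--         if a == 1:
--             return 1
--         g = gcd(a, b)
--     return 0
--
-- def gcd(a, b):
--     """Iterative Euclid: r = a % b first, so b == 0 still raises."""
--     r = a % b
--     while r != 0:
--         a, b = b, r
--         r = a % b
--     return b
-- ===== Notes on version B (the rewrite author's own statement) =====
-- stated objective: alternative
-- what changed: Both recursions (the main reduction and the custom Euclid gcd) are unrolled into explicit while loops with an accumulator; same asymmetric divide-a-by-gcd strategy, iterative instead of recursive control flow.
-- outside the precondition, e.g. on haveAllPrimeDivisorCommon(12, -18): A returns 1, B returns 1; on haveAllPrimeDivisorCommon(2, -3): A raises RecursionError, B does not finish within the time limit; on haveAllPrimeDivisorCommon(5, 0): A raises ZeroDivisionError, B raises ZeroDivisionError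
import Mathlib
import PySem

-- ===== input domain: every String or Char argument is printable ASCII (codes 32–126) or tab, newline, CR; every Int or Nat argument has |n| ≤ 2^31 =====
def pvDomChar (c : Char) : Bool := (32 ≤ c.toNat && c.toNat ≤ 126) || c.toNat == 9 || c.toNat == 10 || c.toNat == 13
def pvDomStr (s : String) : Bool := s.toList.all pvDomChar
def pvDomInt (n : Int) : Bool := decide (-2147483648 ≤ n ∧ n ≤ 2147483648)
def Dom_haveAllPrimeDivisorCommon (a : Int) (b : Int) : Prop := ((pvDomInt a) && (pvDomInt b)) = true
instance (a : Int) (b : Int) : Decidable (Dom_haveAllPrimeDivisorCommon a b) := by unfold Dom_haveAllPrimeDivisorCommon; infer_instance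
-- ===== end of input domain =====

-- B unrolls A's two recursions (the main reduction and the custom gcd) into explicit while loops; same values, iterative control flow ("alternative").

-- Python's |a % b| < |b| for b ≠ 0; cited by the termination proofs of both gcd ports.
theorem pvNatAbsModLt (a b : Int) (hb : b ≠ 0) : (PySem.Int.mod a b).natAbs < b.natAbs := by
  rcases lt_or_gt_of_ne hb with h | h
  · have h1 := (PySem.Int.mod_neg_bounds a h).1
    have h2 := (PySem.Int.mod_neg_bounds a h).2
    omega
  · have h1 := PySem.Int.mod_nonneg a h
    have h2 := PySem.Int.mod_lt a h
    omega

-- ===== PORT A =====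
-- recursive custom gcd: r = a % b; if r == 0: return b; return gcd(b, r)
-- (the `if b = 0` guard only makes the port total where Python raises ZeroDivisionError)
def pvGcdA (a : Int) (b : Int) : Int :=
  if hb : b = 0 then 0
  else
    let r := PySem.Int.mod a b
    if r = 0 then b else pvGcdA b r
termination_by b.natAbs
decreasing_by
  exact pvNatAbsModLt a b hb

-- the recursive body of haveAllPrimeDivisorCommon, with a fuel guard for totality
-- (fuel 200 is far above the recursion depth reached on any input admitted by Pre_)
def pvRecA (fuel : Nat) (a : Int) (b : Int) : Int :=
  match fuel with
  | 0 => 0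
  | f + 1 =>
    let g := pvGcdA a b
    if a = 1 ∧ b = 1 then 1
    else if g = 1 then 0
    else
      let k := PySem.Int.floordiv a g
      if k = 1 then 1 else pvRecA f k b

def haveAllPrimeDivisorCommon (a : Int) (b : Int) : Int := pvRecA 200 a b

-- ===== PORT B =====
-- iterative Euclid: r = a % b; while r != 0: a, b = b, r; r = a % b; return b
def pvGcdLoopB (x : Int) (y : Int) (r : Int) : Int :=
  if hr : r = 0 then y else pvGcdLoopB y r (PySem.Int.mod y r)
termination_by r.natAbs
decreasing_by
  exact pvNatAbsModLt y r hr

def pvGcdB (a : Int) (b : Int) : Int := pvGcdLoopB a b (PySem.Int.mod a b)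

-- the `while g != 1` loop, with a fuel guard for totality
def pvWhileB (fuel : Nat) (b : Int) (a : Int) (g : Int) : Int :=
  match fuel with
  | 0 => 0
  | f + 1 =>
    if g = 1 then 0
    else
      let a' := PySem.Int.floordiv a g
      if a' = 1 then 1
      else pvWhileB f b a' (pvGcdB a' b)

def haveAllPrimeDivisorCommon_alt (a : Int) (b : Int) : Int :=
  let g := pvGcdB a b
  if a = 1 ∧ b = 1 then 1 else pvWhileB 200 b a g

-- ===== PRECONDITION & SPEC =====
-- Pre_ excludes b ≤ 0 (b = 0 raises ZeroDivisionError in gcd; for b < 0 the custom gcd's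
-- negative remainders drive A into (almost always) a RecursionError, and B's loop diverges
-- on the same inputs) and a = 0 with b ≠ 1 (infinite recursion / RecursionError in A).
def Pre_haveAllPrimeDivisorCommon (a : Int) (b : Int) : Prop := 1 ≤ b ∧ (a ≠ 0 ∨ b = 1)
instance (a : Int) (b : Int) : Decidable (Pre_haveAllPrimeDivisorCommon a b) := by unfold Pre_haveAllPrimeDivisorCommon; infer_instance
def pvWitness_haveAllPrimeDivisorCommon : Int × Int := (12, 18)

def Spec_haveAllPrimeDivisorCommon (a : Int) (b : Int) (out : Int) : Prop := out = haveAllPrimeDivisorCommon_alt a b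
instance (a : Int) (b : Int) (out : Int) : Decidable (Spec_haveAllPrimeDivisorCommon a b out) := by unfold Spec_haveAllPrimeDivisorCommon; infer_instance

-- ===== CLAIM (what is proved, stated in full; the proofs are below) =====
def Claim_equal_haveAllPrimeDivisorCommon : Prop := ∀ (a : Int) (b : Int), Dom_haveAllPrimeDivisorCommon a b → Pre_haveAllPrimeDivisorCommon a b → Spec_haveAllPrimeDivisorCommon a b (haveAllPrimeDivisorCommon a b)

-- ===== LEMMAS AND PROOFS =====

-- the iterative gcd computes the recursive gcd (for any nonzero divisor)
theorem pvGcd_eq : ∀ (n : Nat) (a b : Int), b.natAbs = n → b ≠ 0 → pvGcdB a b = pvGcdA a b := by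
  intro n
  induction n using Nat.strong_induction_on with
  | _ n ih =>
    intro a b hn hb
    rw [pvGcdB, pvGcdA, pvGcdLoopB]
    by_cases hr : PySem.Int.mod a b = 0
    · simp [hr, hb]
    · simp only [hr, hb, ite_false]
      have hlt : (PySem.Int.mod a b).natAbs < n := hn ▸ pvNatAbsModLt a b hb
      have := ih (PySem.Int.mod a b).natAbs hlt b (PySem.Int.mod a b) rfl hr
      rw [← this]
      rfl

-- the while loop computes the recursive reduction, fuel in lockstep
theorem pvWhile_eq : ∀ (f : Nat) (a b : Int), b ≠ 0 →
    pvRecA (f + 1) a b = if a = 1 ∧ b = 1 then 1 else pvWhileB (f + 1) b a (pvGcdB a b) := by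
  intro f
  induction f with
  | zero =>
    intro a b hb
    rw [pvGcd_eq b.natAbs a b rfl hb]
    simp [pvRecA, pvWhileB]
  | succ f ih =>
    intro a b hb
    rw [pvGcd_eq b.natAbs a b rfl hb]
    by_cases h11 : a = 1 ∧ b = 1
    · simp [pvRecA, h11]
    by_cases hg : pvGcdA a b = 1
    · simp [pvRecA, pvWhileB, h11, hg]
    by_cases hk : PySem.Int.floordiv a (pvGcdA a b) = 1
    · simp [pvRecA, pvWhileB, h11, hg, hk]
    · have step : pvRecA (f + 1 + 1) a b = pvRecA (f + 1) (PySem.Int.floordiv a (pvGcdA a b)) b := by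
        simp [pvRecA, h11, hg, hk]
      rw [step, ih (PySem.Int.floordiv a (pvGcdA a b)) b hb]
      have hknot : ¬ (PySem.Int.floordiv a (pvGcdA a b) = 1 ∧ b = 1) := fun h => hk h.1
      rw [if_neg hknot]
      rw [pvGcd_eq b.natAbs (PySem.Int.floordiv a (pvGcdA a b)) b rfl hb]
      simp only [pvWhileB, h11, hg, hk, ite_false]
      rw [pvGcd_eq b.natAbs (PySem.Int.floordiv a (pvGcdA a b)) b rfl hb]

-- ===== VERDICT (by name: the statement is the Claim_ definition above) =====
theorem haveAllPrimeDivisorCommon_spec : Claim_equal_haveAllPrimeDivisorCommon := by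
  intro a b _ hpre
  have hb : b ≠ 0 := by
    have := hpre.1
    omega
  unfold Spec_haveAllPrimeDivisorCommon haveAllPrimeDivisorCommon haveAllPrimeDivisorCommon_alt
  exact pvWhile_eq 199 a b hb
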